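-- pv_equiv track=rewrite | github.com/LucasHissinger/Twitter_bot | anime.py | parsing
-- ===== SOURCE A (Python) =====
-- def parsing(string):
--     string = list(string)
--     new = ""
--     state = 0
--     for char in string:
--         if char == '#' or char == '@':
--             state = 1;
--         if state == 0:
--             new += char
--         if char == ' ':
--             state = 0
--     return new
-- ===== SOURCE B (Python) =====
-- def parsing(string):
--     out = []
--     i = 0
--     n = len(string)
--     while i < n:
--         c = string[i]
--         if c == '#' or c == '@':
--             j = string.find(' ', i)
--             i = n if j == -1 else j + 1
--         else:
--             out.append(c)
--             i += 1
--     return ''.join(out)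
-- ===== Notes on version B (the rewrite author's own statement) =====
-- stated objective: alternative
-- what changed: Replaces A's per-character two-state machine with an index-jumping scan: on '#'/'@' it uses str.find to jump past the token and its single delimiting space, appending plain characters to a list joined once at the end.
import Mathlib
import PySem

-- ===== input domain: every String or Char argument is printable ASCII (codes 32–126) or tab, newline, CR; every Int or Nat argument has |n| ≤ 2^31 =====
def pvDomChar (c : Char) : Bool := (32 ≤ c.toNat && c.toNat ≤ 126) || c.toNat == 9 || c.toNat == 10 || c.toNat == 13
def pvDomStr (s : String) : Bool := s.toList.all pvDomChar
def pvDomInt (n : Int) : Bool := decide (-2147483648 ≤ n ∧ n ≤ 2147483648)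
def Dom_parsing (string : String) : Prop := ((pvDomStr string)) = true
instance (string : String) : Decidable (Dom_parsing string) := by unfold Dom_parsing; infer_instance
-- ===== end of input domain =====

-- B replaces A's per-character two-state machine with an index-jumping scan (str.find past each '#'/'@' token and its delimiting space); alternative decomposition, same cost.

-- ===== PORT A =====
-- the for-loop over the characters, carrying (accumulated output, state)
def parsingGo : List Char → Int → List Char
  | [], _ => []
  | c :: rest, state =>
    let state1 := if c = '#' ∨ c = '@' then 1 else state
    let out := if state1 = 0 then [c] else []
    let state2 := if c = ' ' then 0 else state1
    out ++ parsingGo rest state2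

def parsing (string : String) : String := String.mk (parsingGo string.toList 0)

-- ===== PORT B =====
-- Source B's `string.find(' ', i)` jump: drop characters up to and including the first space
def pvDropToSpace : List Char → List Char
  | [] => []
  | c :: rest => if c = ' ' then rest else pvDropToSpace rest

theorem pvDropToSpace_length (l : List Char) : (pvDropToSpace l).length ≤ l.length := by
  induction l with
  | nil => simp [pvDropToSpace]
  | cons c rest ih =>
    simp only [pvDropToSpace]
    split <;> simp <;> omega

-- the while-loop: append plain chars, jump past '#'/'@' tokens
def parsingAltGo : List Char → List Char
  | [] => []
  | c :: rest =>
    if c = '#' ∨ c = '@' then parsingAltGo (pvDropToSpace rest)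
    else c :: parsingAltGo rest
termination_by l => l.length
decreasing_by
  · exact Nat.lt_succ_of_le (pvDropToSpace_length rest)
  · simp

def parsing_alt (string : String) : String := String.mk (parsingAltGo string.toList)

-- ===== PRECONDITION & SPEC =====
def Spec_parsing (string : String) (out : String) : Prop := out = parsing_alt string
instance (string : String) (out : String) : Decidable (Spec_parsing string out) := by unfold Spec_parsing; infer_instance

-- ===== CLAIM (what is proved, stated in full; the proofs are below) =====
def Claim_equal_parsing : Prop := ∀ (string : String), Dom_parsing string → Spec_parsing string (parsing string)

-- ===== LEMMAS AND PROOFS =====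
theorem parsingGo_eq (l : List Char) :
    parsingGo l 0 = parsingAltGo l ∧ parsingGo l 1 = parsingAltGo (pvDropToSpace l) := by
  induction l with
  | nil => simp [parsingGo, parsingAltGo, pvDropToSpace]
  | cons c rest ih =>
    obtain ⟨ih0, ih1⟩ := ih
    constructor
    · by_cases h : c = '#' ∨ c = '@'
      · have hns : ¬ c = ' ' := by rcases h with h | h <;> simp [h]
        simp [parsingGo, parsingAltGo, h, hns, ih1]
      · simp [parsingGo, parsingAltGo, h, ih0]
    · by_cases h : c = '#' ∨ c = '@'
      · have hns : ¬ c = ' ' := by rcases h with h | h <;> simp [h]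
        simp [parsingGo, pvDropToSpace, h, hns, ih1]
      · by_cases hs : c = ' '
        · simp [parsingGo, pvDropToSpace, h, hs, ih0]
        · simp [parsingGo, pvDropToSpace, h, hs, ih1]

-- ===== VERDICT (by name: the statement is the Claim_ definition above) =====
theorem parsing_spec : Claim_equal_parsing := by
  intro s _
  unfold Spec_parsing parsing parsing_alt
  rw [(parsingGo_eq s.toList).1]
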